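-- pv_equiv track=rewrite | github.com/SauretCyril/Ateliers_python_ind1 | Exercices/p13_applicaion itérateur.py | yrange
-- ===== SOURCE A (Python) =====
-- def yrange(start, stop=None, step=1):
--     if stop is None:
--         stop = 1
--     if step == 0:
--         raise ValueError("Le pas ne peut pas être zéro.")
--     if start < stop:
--         raise ValueError("Le point de départ doit être supérieur au point d'arrêt pour une liste inversée.")
--
--     current = start
--     while current >= stop:
--         yield current
--         current -= step
-- ===== SOURCE B (Python) =====
-- def yrange(start, stop=None, step=1):
--     if stop is None:
--         stop = 1
--     if step == 0:
--         raise ValueError("Le pas ne peut pas être zéro.")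
--     if start < stop:
--         raise ValueError("Le point de départ doit être supérieur au point d'arrêt pour une liste inversée.")
--     n = (start - stop) // step + 1
--     yield from (start - i * step for i in range(n))
-- ===== Notes on version B (the rewrite author's own statement) =====
-- stated objective: alternative
-- what changed: Replaces the while loop that decrements a running 'current' with a closed-form element count n = (start-stop)//step + 1 and a comprehension over range(n).
-- outside the precondition, e.g. on yrange(5, 1, -2): A does not finish within the time limit, B returns []; on yrange(5, 1, 0): A raises ValueError, B raises ValueError; on yrange(0, 5, 1): A raises ValueError, B raises ValueError
import Mathlib
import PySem

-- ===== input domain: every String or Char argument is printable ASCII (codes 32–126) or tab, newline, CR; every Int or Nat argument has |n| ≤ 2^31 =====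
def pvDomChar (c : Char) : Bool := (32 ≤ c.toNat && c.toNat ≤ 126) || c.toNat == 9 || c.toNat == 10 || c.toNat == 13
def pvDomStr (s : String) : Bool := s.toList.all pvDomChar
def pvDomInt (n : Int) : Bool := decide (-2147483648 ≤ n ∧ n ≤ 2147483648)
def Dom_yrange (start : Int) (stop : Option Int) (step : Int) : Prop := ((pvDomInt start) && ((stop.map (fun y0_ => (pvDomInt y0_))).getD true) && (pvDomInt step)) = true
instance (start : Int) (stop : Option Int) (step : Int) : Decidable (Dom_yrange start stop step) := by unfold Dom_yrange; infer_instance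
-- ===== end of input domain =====

-- B replaces A's decrementing while-loop with a closed-form element count and a
-- map over range(n) (objective: alternative decomposition, same O(n) cost).
-- A is a generator; equality is about the full yielded sequence (list(...)).

-- ===== PORT A =====
-- the while loop `while current >= stop: yield current; current -= step`.
-- The `0 < step` conjunct is a totality guard only: for step < 0 the Python
-- loop never terminates (such inputs are outside Pre_yrange).
def yrangeLoop (stop step current : Int) : List Int :=
  if 0 < step ∧ stop ≤ current then
    current :: yrangeLoop stop step (current - step)
  else []
termination_by (current + 1 - stop).toNat
decreasing_by omega

-- Python raises ValueError when step = 0 or start < stop; the port returns []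
-- there (those inputs are outside Pre_yrange).
def yrange (start : Int) (stop : Option Int) (step : Int) : List Int :=
  let stp := stop.getD 1
  if step = 0 then []
  else if start < stp then []
  else yrangeLoop stp step start

-- ===== PORT B =====
def yrange_alt (start : Int) (stop : Option Int) (step : Int) : List Int :=
  let stp := stop.getD 1
  if step = 0 then []
  else if start < stp then []
  else
    let n := PySem.Int.floordiv (start - stp) step + 1
    (PySem.List.pyRange 0 n 1).map (fun i => start - i * step)

-- ===== PRECONDITION & SPEC =====
-- Pre_ excludes exactly the inputs where A does not return a value:
-- step = 0 and start < stop(default 1) raise ValueError; step < 0 makes the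
-- generator infinite (list(...) diverges).
def Pre_yrange (start : Int) (stop : Option Int) (step : Int) : Prop :=
  0 < step ∧ stop.getD 1 ≤ start
instance (start : Int) (stop : Option Int) (step : Int) : Decidable (Pre_yrange start stop step) := by unfold Pre_yrange; infer_instance

def pvWitness_yrange : Int × Option Int × Int := (5, some 1, 2)

def Spec_yrange (start : Int) (stop : Option Int) (step : Int) (out : List Int) : Prop := out = yrange_alt start stop step
instance (start : Int) (stop : Option Int) (step : Int) (out : List Int) : Decidable (Spec_yrange start stop step out) := by unfold Spec_yrange; infer_instance

-- ===== CLAIM (what is proved, stated in full; the proofs are below) =====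
def Claim_equal_yrange : Prop := ∀ (start : Int) (stop : Option Int) (step : Int), Dom_yrange start stop step → Pre_yrange start stop step → Spec_yrange start stop step (yrange start stop step)

-- ===== LEMMAS AND PROOFS =====

-- the loop yields current, current-step, …, n+1 values, where n = (current-stop)//step
theorem yrangeLoop_eq_map_range (stop step : Int) (hstep : 0 < step) :
    ∀ (n : Nat) (current : Int), stop ≤ current →
      PySem.Int.floordiv (current - stop) step = (n : Int) →
      yrangeLoop stop step current
        = (List.range (n + 1)).map (fun k : Nat => current - (k : Int) * step) := by
  intro n
  induction n with
  | zero =>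
    intro current hle hF
    rw [PySem.Int.floordiv_eq_iff_of_pos hstep] at hF
    rw [yrangeLoop, if_pos ⟨hstep, hle⟩, yrangeLoop, if_neg (by omega)]
    simp
  | succ n ih =>
    intro current hle hF
    rw [PySem.Int.floordiv_eq_iff_of_pos hstep] at hF
    have hstep1 : ((n : Int) + 1) * step ≤ current - stop := by exact_mod_cast hF.1
    have hn0 : 0 ≤ (n : Int) * step := mul_nonneg (by positivity) (le_of_lt hstep)
    have hle' : stop ≤ current - step := by nlinarith
    have hF' : PySem.Int.floordiv (current - step - stop) step = (n : Int) := by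
      rw [PySem.Int.floordiv_eq_iff_of_pos hstep]
      constructor
      · nlinarith
      · have := hF.2
        push_cast at this ⊢
        nlinarith
    rw [yrangeLoop, if_pos ⟨hstep, hle⟩, ih (current - step) hle' hF']
    conv_rhs => rw [show n + 1 + 1 = (n + 1) + 1 from rfl, List.range_succ_eq_map,
        List.map_cons, List.map_map]
    rw [List.cons_eq_cons]
    refine ⟨by norm_num, ?_⟩
    apply List.map_congr_left
    intro k _
    simp only [Function.comp]
    push_cast
    ring

-- ===== VERDICT (by name: the statement is the Claim_ definition above) =====
theorem yrange_spec : Claim_equal_yrange := by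
  intro start stop step _ hpre
  obtain ⟨hstep, hle⟩ := hpre
  unfold Spec_yrange yrange yrange_alt
  simp only []
  rw [if_neg (by omega), if_neg (by omega), if_neg (by omega), if_neg (by omega)]
  have hq0 : 0 ≤ PySem.Int.floordiv (start - stop.getD 1) step := by
    rw [PySem.Int.floordiv_eq_ediv_of_pos hstep]
    exact Int.ediv_nonneg (by omega) (le_of_lt hstep)
  set q := PySem.Int.floordiv (start - stop.getD 1) step with hq
  have hqn : q = ((q.toNat : Nat) : Int) := by omega
  rw [yrangeLoop_eq_map_range (stop.getD 1) step hstep q.toNat start hle (by omega)]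
  rw [PySem.List.pyRange_one, List.map_map]
  have hlen : (q + 1 - 0).toNat = q.toNat + 1 := by omega
  rw [hlen]
  apply List.map_congr_left
  intro k _
  simp only [Function.comp]
  ring
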